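-- pv_equiv track=rewrite | github.com/teymurrzayev/python-naa | exam/compare_swaps_bubble_insertion_sort.py | compare_swaps_bubble_insertion_sort
-- ===== SOURCE A (Python) =====
-- def compare_swaps_bubble_insertion_sort(arr):
--     bubble, insertion = 0, 0
--
--     a = arr[:]
--     for i in range(len(a)):
--         for j in range(len(a) - 1):
--             if a[j] > a[j + 1]:
--                 a[j], a[j + 1] = a[j + 1], a[j]
--                 bubble += 1
--
--     a = arr[:]
--     for i in range(1, len(a)):
--         j = i
--         while j > 0 and a[j] < a[j - 1]:
--             a[j], a[j - 1] = a[j - 1], a[j]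
--             insertion += 1
--             j -= 1
--     return "insertion" if insertion < bubble else "bubble"
-- ===== SOURCE B (Python) =====
-- def compare_swaps_bubble_insertion_sort(arr):
--     # Both bubble sort and insertion sort perform exactly one swap per
--     # inversion of arr (each swap exchanges an adjacent out-of-order pair,
--     # removing exactly one inversion, and both sorts finish fully sorted),
--     # so the two counts are always equal and 'insertion < bubble' is never
--     # true: the answer is always "bubble".
--     return "bubble"
-- ===== Notes on version B (the rewrite author's own statement) =====
-- stated objective: faster
-- what changed: Replaced the two O(n^2) sort simulations by the constant 'bubble': both swap counts equal the inversion count of arr (adjacent swaps of out-of-order pairs remove exactly one inversion each and both sorts end sorted), so insertion < bubble never holds.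
import Mathlib
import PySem

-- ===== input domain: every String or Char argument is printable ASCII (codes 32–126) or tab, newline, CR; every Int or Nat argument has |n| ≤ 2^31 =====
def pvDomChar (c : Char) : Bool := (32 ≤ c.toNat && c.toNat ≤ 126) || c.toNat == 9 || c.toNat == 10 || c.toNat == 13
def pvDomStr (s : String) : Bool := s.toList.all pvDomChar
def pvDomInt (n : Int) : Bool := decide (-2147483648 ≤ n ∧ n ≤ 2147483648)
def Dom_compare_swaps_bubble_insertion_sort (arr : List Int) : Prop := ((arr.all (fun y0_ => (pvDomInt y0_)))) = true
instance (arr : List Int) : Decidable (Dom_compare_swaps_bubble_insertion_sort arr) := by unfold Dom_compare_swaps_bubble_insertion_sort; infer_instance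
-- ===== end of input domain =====

-- B replaces the two O(n^2) sort simulations by the constant "bubble": each sort performs
-- exactly one adjacent swap per inversion of arr, so the two counts are always equal.

-- ===== PORT A =====
-- body of the inner bubble loop: 'if a[j] > a[j+1]: a[j], a[j+1] = a[j+1], a[j]; bubble += 1'
-- (the compared/assigned indices are always in range when reached, so total pyGetD/pySetD are exact here)
def pvBubStep (st : List Int × Int) (j : Int) : List Int × Int :=
  if PySem.List.pyGetD st.1 j 0 > PySem.List.pyGetD st.1 (j + 1) 0 then
    (PySem.List.pySetD (PySem.List.pySetD st.1 j (PySem.List.pyGetD st.1 (j + 1) 0)) (j + 1)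
        (PySem.List.pyGetD st.1 j 0),
      st.2 + 1)
  else st

-- 'while j > 0 and a[j] < a[j-1]: a[j], a[j-1] = a[j-1], a[j]; insertion += 1; j -= 1'
def pvInsWhile (a : List Int) (cnt : Int) (j : Int) : List Int × Int :=
  if h : 0 < j ∧ PySem.List.pyGetD a j 0 < PySem.List.pyGetD a (j - 1) 0 then
    pvInsWhile
      (PySem.List.pySetD (PySem.List.pySetD a j (PySem.List.pyGetD a (j - 1) 0)) (j - 1)
        (PySem.List.pyGetD a j 0))
      (cnt + 1) (j - 1)
  else (a, cnt)
  termination_by j.toNat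
  decreasing_by omega

def compare_swaps_bubble_insertion_sort (arr : List Int) : String :=
  let p1 := (PySem.List.pyRange 0 (PySem.List.len arr) 1).foldl
    (fun st _i => (PySem.List.pyRange 0 (PySem.List.len st.1 - 1) 1).foldl pvBubStep st)
    (arr, (0 : Int))
  let bubble := p1.2
  let p2 := (PySem.List.pyRange 1 (PySem.List.len arr) 1).foldl
    (fun st i => pvInsWhile st.1 st.2 i) (arr, (0 : Int))
  let insertion := p2.2
  if insertion < bubble then "insertion" else "bubble"

-- ===== PORT B =====
def compare_swaps_bubble_insertion_sort_alt (arr : List Int) : String := "bubble"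

-- ===== PRECONDITION & SPEC =====
def Spec_compare_swaps_bubble_insertion_sort (arr : List Int) (out : String) : Prop := out = compare_swaps_bubble_insertion_sort_alt arr
instance (arr : List Int) (out : String) : Decidable (Spec_compare_swaps_bubble_insertion_sort arr out) := by unfold Spec_compare_swaps_bubble_insertion_sort; infer_instance

-- ===== CLAIM (what is proved, stated in full; the proofs are below) =====
def Claim_equal_compare_swaps_bubble_insertion_sort : Prop := ∀ (arr : List Int), Dom_compare_swaps_bubble_insertion_sort arr → Spec_compare_swaps_bubble_insertion_sort arr (compare_swaps_bubble_insertion_sort arr)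

-- ===== LEMMAS AND PROOFS =====

def pvInv : List Int → Nat
  | [] => 0
  | x :: xs => xs.countP (fun z => decide (z < x)) + pvInv xs

theorem pvInv_swap (p s : List Int) (x y : Int) (hyx : y < x) :
    pvInv (p ++ y :: x :: s) + 1 = pvInv (p ++ x :: y :: s) := by
  induction p with
  | nil =>
    simp only [List.nil_append, pvInv, List.countP_cons]
    have h1 : ¬ (x < y) := by omega
    simp [h1, hyx]
    omega
  | cons z p ih =>
    simp only [List.cons_append, pvInv]
    have hperm : (p ++ y :: x :: s).Perm (p ++ x :: y :: s) :=
      List.Perm.append_left p (List.Perm.swap x y s)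
    rw [hperm.countP_eq]
    omega

def pvBPass : List Int → List Int
  | [] => []
  | [x] => [x]
  | x :: y :: r => if y < x then y :: pvBPass (x :: r) else x :: pvBPass (y :: r)
  termination_by l => l.length
  decreasing_by all_goals simp

def pvBCount : List Int → Nat
  | [] => 0
  | [_] => 0
  | x :: y :: r => if y < x then pvBCount (x :: r) + 1 else pvBCount (y :: r)
  termination_by l => l.length
  decreasing_by all_goals simp

theorem pvBPass_perm (l : List Int) : (pvBPass l).Perm l := by
  induction l using pvBPass.induct with
  | case1 => simp [pvBPass]
  | case2 x => simp [pvBPass]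
  | case3 x y r h ih =>
    rw [pvBPass, if_pos h]
    exact (ih.cons y).trans (List.Perm.swap x y r)
  | case4 x y r h ih =>
    rw [pvBPass, if_neg h]
    exact ih.cons x

theorem pvInv_pvBPass (l : List Int) : pvInv (pvBPass l) + pvBCount l = pvInv l := by
  induction l using pvBPass.induct with
  | case1 => simp [pvBPass, pvBCount]
  | case2 x => simp [pvBPass, pvBCount, pvInv]
  | case3 x y r h ih =>
    rw [pvBPass, if_pos h, pvBCount, if_pos h]
    have hcp : ((pvBPass (x :: r)).countP (fun z => decide (z < y)))
        = (x :: r).countP (fun z => decide (z < y)) := (pvBPass_perm (x :: r)).countP_eq _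
    have hx : ¬ (x < y) := by omega
    simp only [pvInv, hcp, List.countP_cons]
    have hunf : pvInv (x :: r) = r.countP (fun z => decide (z < x)) + pvInv r := rfl
    simp [hx, h]
    omega
  | case4 x y r h ih =>
    rw [pvBPass, if_neg h, pvBCount, if_neg h]
    have hcp : ((pvBPass (y :: r)).countP (fun z => decide (z < x)))
        = (y :: r).countP (fun z => decide (z < x)) := (pvBPass_perm (y :: r)).countP_eq _
    have hy : ¬ (y < x) := h
    simp only [pvInv, hcp, List.countP_cons]
    have hunf : pvInv (y :: r) = r.countP (fun z => decide (z < y)) + pvInv r := rfl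
    simp [hy]
    omega

theorem pvBubStep_shift (l : List Int) (x c : Int) (n : Nat) :
    pvBubStep (x :: l, c) ((n : Int) + 1)
      = ((x :: (pvBubStep (l, c) (n : Int)).1), (pvBubStep (l, c) (n : Int)).2) := by
  have e1 : ((n : Int) + 1) = ((n + 1 : Nat) : Int) := by push_cast; ring
  have e2 : (((n + 1 : Nat) : Int) + 1) = ((n + 2 : Nat) : Int) := by push_cast; ring
  simp only [pvBubStep, e1, e2, PySem.List.pyGetD_natCast, PySem.List.pySetD_natCast]
  simp only [show n + 2 = (n + 1) + 1 from by omega, List.getD_cons_succ, List.set_cons_succ]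
  split_ifs <;> rfl

theorem pvBubFold_shift (m : Nat) (x : Int) (l : List Int) (c : Int) :
    ((List.range m).map (fun k : Nat => (1 : Int) + k)).foldl pvBubStep (x :: l, c)
      = ((x :: (((List.range m).map (fun k : Nat => (0 : Int) + k)).foldl pvBubStep (l, c)).1),
          (((List.range m).map (fun k : Nat => (0 : Int) + k)).foldl pvBubStep (l, c)).2) := by
  induction m with
  | zero => simp
  | succ m ih =>
    rw [List.range_succ, List.map_append, List.map_append, List.foldl_append, List.foldl_append]
    simp only [List.map_cons, List.map_nil, List.foldl_cons, List.foldl_nil]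
    rw [ih]
    have hs := pvBubStep_shift
      ((((List.range m).map (fun k : Nat => (0 : Int) + k)).foldl pvBubStep (l, c)).1) x
      ((((List.range m).map (fun k : Nat => (0 : Int) + k)).foldl pvBubStep (l, c)).2) m
    have e1 : (1 : Int) + (m : Int) = (m : Int) + 1 := by ring
    have e2 : (0 : Int) + (m : Int) = (m : Int) := by ring
    rw [e1, e2, hs]

theorem pvBubFold (a : List Int) : ∀ c : Int,
    (PySem.List.pyRange 0 ((a.length : Int) - 1) 1).foldl pvBubStep (a, c)
      = (pvBPass a, c + (pvBCount a : Int)) := by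
  induction a using pvBPass.induct with
  | case1 =>
    intro c
    rw [PySem.List.pyRange_one_eq_nil (by norm_num)]
    simp [pvBPass, pvBCount]
  | case2 x =>
    intro c
    rw [show ((([x] : List Int).length : Int) - 1) = 0 by simp,
      PySem.List.pyRange_one_eq_nil (by norm_num)]
    simp [pvBPass, pvBCount]
  | case3 x y r h ih =>
    intro c
    have hlen : (((x :: y :: r).length : Int) - 1) = ((r.length + 1 : Nat) : Int) := by
      simp
    rw [hlen, PySem.List.pyRange_one_cons (by positivity), List.foldl_cons]
    have g0 : PySem.List.pyGetD (x :: y :: r) 0 0 = x := PySem.List.pyGetD_zero_cons _ _ _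
    have g1 : PySem.List.pyGetD (x :: y :: r) (0 + 1) 0 = y := by
      rw [show ((0 : Int) + 1) = ((1 : Nat) : Int) by norm_num, PySem.List.pyGetD_natCast]
      rfl
    have s0 : PySem.List.pySetD (x :: y :: r) 0 y = y :: y :: r := by
      rw [PySem.List.pySetD_of_nonneg _ _ _]; · rfl
      · norm_num
    have s1 : PySem.List.pySetD (y :: y :: r) (0 + 1) x = y :: x :: r := by
      rw [PySem.List.pySetD_of_nonneg _ _ _]; · rfl
      · norm_num
    have hstep : pvBubStep (x :: y :: r, c) 0 = (y :: x :: r, c + 1) := by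
      rw [pvBubStep]
      simp only [g0, g1]
      rw [if_pos h, s0, s1]
    rw [hstep]
    have hr : PySem.List.pyRange (0 + 1) ((r.length + 1 : Nat) : Int) 1
        = (List.range r.length).map (fun k : Nat => (1 : Int) + k) := by
      rw [PySem.List.pyRange_one]
      have : (((r.length + 1 : Nat) : Int) - (0 + 1)).toNat = r.length := by omega
      rw [this]
      simp
    rw [hr, pvBubFold_shift]
    have hg : ((List.range r.length).map (fun k : Nat => (0 : Int) + k))
        = PySem.List.pyRange 0 (((x :: r).length : Int) - 1) 1 := by
      rw [PySem.List.pyRange_one]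
      have : ((((x :: r).length : Int) - 1) - 0).toNat = r.length := by simp
      rw [this]
    rw [hg, ih]
    rw [pvBPass, if_pos h, pvBCount, if_pos h, Prod.mk.injEq]
    refine ⟨rfl, by push_cast; ring⟩
  | case4 x y r h ih =>
    intro c
    have hlen : (((x :: y :: r).length : Int) - 1) = ((r.length + 1 : Nat) : Int) := by
      simp
    rw [hlen, PySem.List.pyRange_one_cons (by positivity), List.foldl_cons]
    have g0 : PySem.List.pyGetD (x :: y :: r) 0 0 = x := PySem.List.pyGetD_zero_cons _ _ _
    have g1 : PySem.List.pyGetD (x :: y :: r) (0 + 1) 0 = y := by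
      rw [show ((0 : Int) + 1) = ((1 : Nat) : Int) by norm_num, PySem.List.pyGetD_natCast]
      rfl
    have hstep : pvBubStep (x :: y :: r, c) 0 = (x :: y :: r, c) := by
      rw [pvBubStep]
      simp only [g0, g1]
      rw [if_neg h]
    rw [hstep]
    have hr : PySem.List.pyRange (0 + 1) ((r.length + 1 : Nat) : Int) 1
        = (List.range r.length).map (fun k : Nat => (1 : Int) + k) := by
      rw [PySem.List.pyRange_one]
      have : (((r.length + 1 : Nat) : Int) - (0 + 1)).toNat = r.length := by omega
      rw [this]
      simp
    rw [hr, pvBubFold_shift]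
    have hg : ((List.range r.length).map (fun k : Nat => (0 : Int) + k))
        = PySem.List.pyRange 0 (((y :: r).length : Int) - 1) 1 := by
      rw [PySem.List.pyRange_one]
      have : ((((y :: r).length : Int) - 1) - 0).toNat = r.length := by simp
      rw [this]
    rw [hg, ih]
    rw [pvBPass, if_neg h, pvBCount, if_neg h]

theorem pvBubOuter (idxs : List Int) : ∀ (st : List Int × Int),
    (idxs.foldl (fun st _i => (PySem.List.pyRange 0 (PySem.List.len st.1 - 1) 1).foldl pvBubStep st) st).2
        + (pvInv (idxs.foldl (fun st _i => (PySem.List.pyRange 0 (PySem.List.len st.1 - 1) 1).foldl pvBubStep st) st).1 : Int)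
      = st.2 + (pvInv st.1 : Int) := by
  induction idxs with
  | nil => intro st; rfl
  | cons i idxs ih =>
    intro st
    rw [List.foldl_cons]
    have hinner : ((PySem.List.pyRange 0 (PySem.List.len st.1 - 1) 1).foldl pvBubStep st)
        = (pvBPass st.1, st.2 + (pvBCount st.1 : Int)) := by
      rw [PySem.List.len_eq]
      obtain ⟨a, c⟩ := st
      exact pvBubFold a c
    rw [hinner, ih]
    have := pvInv_pvBPass st.1
    simp only []
    omega

def pvSortedDesc (l : List Int) : Prop := List.Pairwise (fun a b => b ≤ a) l

def pvSift (x : Int) : List Int → List Int × Nat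
  | [] => ([x], 0)
  | b :: rp => if x < b then (b :: (pvSift x rp).1, (pvSift x rp).2 + 1) else (x :: b :: rp, 0)

theorem pvSift_perm (x : Int) (rp : List Int) : ((pvSift x rp).1).Perm (x :: rp) := by
  induction rp with
  | nil => simp [pvSift]
  | cons b rp ih =>
    rw [pvSift]
    split_ifs with hb
    · exact (ih.cons b).trans (List.Perm.swap x b rp)
    · rfl

theorem pvSift_length (x : Int) (rp : List Int) : ((pvSift x rp).1).length = rp.length + 1 := by
  have := (pvSift_perm x rp).length_eq
  simpa using this

theorem pvSift_sorted (x : Int) (rp : List Int) (h : pvSortedDesc rp) :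
    pvSortedDesc (pvSift x rp).1 := by
  induction rp with
  | nil => simp [pvSift, pvSortedDesc]
  | cons b rp ih =>
    rw [pvSortedDesc, pvSift]
    rw [pvSortedDesc] at h
    rw [List.pairwise_cons] at h
    obtain ⟨hb, hrp⟩ := h
    split_ifs with hxb
    · rw [List.pairwise_cons]
      constructor
      · intro a ha
        have : a ∈ x :: rp := (pvSift_perm x rp).mem_iff.mp ha
        rcases List.mem_cons.mp this with h | h
        · subst h; omega
        · exact hb a h
      · exact ih hrp
    · rw [List.pairwise_cons]
      constructor
      · intro a ha
        rcases List.mem_cons.mp ha with h | h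
        · subst h; omega
        · have := hb a h; omega
      · exact List.Pairwise.cons hb hrp

theorem pvSift_inv (x : Int) (rp : List Int) : ∀ rest : List Int,
    pvInv ((pvSift x rp).1.reverse ++ rest) + (pvSift x rp).2
      = pvInv (rp.reverse ++ x :: rest) := by
  induction rp with
  | nil => intro rest; simp [pvSift]
  | cons b rp ih =>
    intro rest
    rw [pvSift]
    split_ifs with hxb
    · simp only [List.reverse_cons, List.append_assoc, List.singleton_append]
      have step1 : pvInv ((pvSift x rp).1.reverse ++ b :: rest) + (pvSift x rp).2
          = pvInv (rp.reverse ++ x :: b :: rest) := ih (b :: rest)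
      have step2 : pvInv (rp.reverse ++ x :: b :: rest) + 1
          = pvInv (rp.reverse ++ b :: x :: rest) := pvInv_swap rp.reverse rest b x hxb
      omega
    · simp only [List.reverse_cons, List.append_assoc, List.singleton_append]
      simp

theorem pvInsWhile_sift (rp : List Int) (x : Int) : ∀ (rest : List Int) (c : Int),
    pvInsWhile (rp.reverse ++ x :: rest) c (rp.length : Int)
      = ((pvSift x rp).1.reverse ++ rest, c + ((pvSift x rp).2 : Int)) := by
  induction rp with
  | nil =>
    intro rest c
    rw [pvInsWhile]
    simp [pvSift]
  | cons b rp ih =>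
    intro rest c
    have hu : (b :: rp).reverse ++ x :: rest = rp.reverse ++ b :: x :: rest := by
      simp
    have hulen : (rp.reverse).length = rp.length := by simp
    have hj : ((b :: rp).length : Int) = ((rp.length + 1 : Nat) : Int) := by simp
    have hj1 : (((rp.length + 1 : Nat) : Int) - 1) = ((rp.length : Nat) : Int) := by push_cast; ring
    have gx : PySem.List.pyGetD (rp.reverse ++ b :: x :: rest) ((rp.length + 1 : Nat) : Int) 0 = x := by
      rw [PySem.List.pyGetD_natCast, ← hulen,
        List.getD_append_right rp.reverse (b :: x :: rest) 0 (rp.reverse.length + 1) (by omega)]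
      simp
    have gb : PySem.List.pyGetD (rp.reverse ++ b :: x :: rest) ((rp.length : Nat) : Int) 0 = b := by
      rw [PySem.List.pyGetD_natCast, ← hulen,
        List.getD_append_right rp.reverse (b :: x :: rest) 0 rp.reverse.length (by omega)]
      simp
    rw [hu, hj, pvInsWhile, hj1, gx, gb]
    by_cases hxb : x < b
    · rw [dif_pos ⟨by positivity, hxb⟩]
      have hset : PySem.List.pySetD
          (PySem.List.pySetD (rp.reverse ++ b :: x :: rest) ((rp.length + 1 : Nat) : Int) b)
          ((rp.length : Nat) : Int) x
          = rp.reverse ++ x :: b :: rest := by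
        simp only [PySem.List.pySetD_natCast, ← hulen]
        rw [List.set_append_right (s := rp.reverse) (t := b :: x :: rest) (rp.reverse.length + 1) b (by omega)]
        rw [List.set_append_right (s := rp.reverse) (rp.reverse.length) x (by omega)]
        simp
      rw [hset]
      have := ih (b :: rest) (c + 1)
      rw [show rp.reverse ++ x :: b :: rest = rp.reverse ++ x :: (b :: rest) from rfl, this]
      rw [pvSift, if_pos hxb]
      simp only [List.reverse_cons, List.append_assoc, List.singleton_append, Prod.mk.injEq]
      exact ⟨trivial, by push_cast; ring⟩
    · rw [dif_neg (by tauto)]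
      rw [pvSift, if_neg hxb]
      simp

theorem pvInsOuter (rest : List Int) : ∀ (rp : List Int) (c : Int), pvSortedDesc rp →
    ∃ rp', pvSortedDesc rp'
      ∧ ((PySem.List.pyRange (rp.length : Int) ((rp.length + rest.length : Nat) : Int) 1).foldl
          (fun st i => pvInsWhile st.1 st.2 i) (rp.reverse ++ rest, c))
        = (rp'.reverse,
            c + (pvInv (rp.reverse ++ rest) : Int) - (pvInv rp'.reverse : Int)) := by
  induction rest with
  | nil =>
    intro rp c h
    simp only [List.length_nil, Nat.add_zero, List.append_nil]
    rw [PySem.List.pyRange_one_eq_nil le_rfl, List.foldl_nil]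
    exact ⟨rp, h, by simp⟩
  | cons x rest ih =>
    intro rp c h
    rw [PySem.List.pyRange_one_cons (by simp), List.foldl_cons]
    rw [pvInsWhile_sift rp x rest c]
    have hlen : ((rp.length : Int) + 1) = (((pvSift x rp).1.length : Nat) : Int) := by
      rw [pvSift_length]; push_cast; ring
    have hlen2 : ((rp.length + (x :: rest).length : Nat) : Int)
        = (((pvSift x rp).1.length + rest.length : Nat) : Int) := by
      rw [pvSift_length]; push_cast; simp; ring
    rw [hlen, hlen2]
    have hrev : (pvSift x rp).1.reverse ++ rest
        = ((pvSift x rp).1).reverse ++ rest := rfl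
    obtain ⟨rp', hs', heq⟩ := ih ((pvSift x rp).1) (c + ((pvSift x rp).2 : Int))
      (pvSift_sorted x rp h)
    refine ⟨rp', hs', ?_⟩
    rw [heq]
    have hacc := pvSift_inv x rp rest
    rw [Prod.mk.injEq]
    refine ⟨rfl, ?_⟩
    omega

theorem pvInv_sorted (l : List Int) (h : List.Pairwise (· ≤ ·) l) : pvInv l = 0 := by
  induction l with
  | nil => rfl
  | cons x xs ih =>
    rw [List.pairwise_cons] at h
    rw [pvInv]
    rw [List.countP_eq_zero.mpr (by intro a ha; simpa using by have := h.1 a ha; omega)]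
    simp [ih h.2]

theorem pv_main (arr : List Int) : compare_swaps_bubble_insertion_sort arr = "bubble" := by
  rw [compare_swaps_bubble_insertion_sort]
  have hbub := pvBubOuter (PySem.List.pyRange 0 (PySem.List.len arr) 1) (arr, (0 : Int))
  have hB : ((PySem.List.pyRange 0 (PySem.List.len arr) 1).foldl
      (fun st _i => (PySem.List.pyRange 0 (PySem.List.len st.1 - 1) 1).foldl pvBubStep st)
      (arr, (0 : Int))).2 ≤ (pvInv arr : Int) := by
    simp only [] at hbub
    omega
  have hI : ((PySem.List.pyRange 1 (PySem.List.len arr) 1).foldl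
      (fun st i => pvInsWhile st.1 st.2 i) (arr, (0 : Int))).2 = (pvInv arr : Int) := by
    cases arr with
    | nil =>
      rw [PySem.List.len_eq]
      rw [PySem.List.pyRange_one_eq_nil (by norm_num), List.foldl_nil]
      simp [pvInv]
    | cons x rest =>
      rw [show PySem.List.pyRange 1 (PySem.List.len (x :: rest)) 1
          = PySem.List.pyRange ((([x] : List Int).length : Nat) : Int)
              ((([x] : List Int).length + rest.length : Nat) : Int) 1 from by
        norm_num [PySem.List.len_eq]; ring_nf]
      rw [show ((x :: rest, (0 : Int)) : List Int × Int)
          = (([x] : List Int).reverse ++ rest, (0 : Int)) from by simp]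
      obtain ⟨rp', hs', heq⟩ := pvInsOuter rest [x] 0 (by simp [pvSortedDesc])
      rw [heq]
      have hz : pvInv rp'.reverse = 0 := by
        apply pvInv_sorted
        rw [List.pairwise_reverse]
        exact hs'
      have hz2 : ([x] : List Int).reverse ++ rest = x :: rest := by simp
      rw [hz, hz2]
      simp
  rw [hI] at *
  rw [if_neg (by omega)]

-- ===== VERDICT (by name: the statement is the Claim_ definition above) =====
theorem compare_swaps_bubble_insertion_sort_spec : Claim_equal_compare_swaps_bubble_insertion_sort := by
  intro arr _
  unfold Spec_compare_swaps_bubble_insertion_sort compare_swaps_bubble_insertion_sort_alt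
  exact pv_main arr
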